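-- pv_equiv track=rewrite | github.com/m0iino/iavacas21 | app.py | hacerJugada
-- ===== SOURCE A (Python) =====
-- size = 8
--
-- def estaEnTablero(x, y):
--
--     return x >= 0 and x < size and y >= 0 and y < size
--
-- def esJugadaValida(tablero, baldosa, comienzox, comienzoy):
--
--     if tablero[comienzox][comienzoy] != ' ' or not estaEnTablero(comienzox, comienzoy):
--         return False
--
--     tablero[comienzox][comienzoy] = baldosa
--
--     if baldosa == '1':
--         otraBaldosa = '0'
--     else:
--         otraBaldosa = '1'
--
--     baldosasAConvertir = []
--     for direcciónx, direccióny in [[0, 1], [1, 1], [1, 0], [1, -1], [0, -1], [-1, -1], [-1, 0], [-1, 1]]: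
--         x, y = comienzox, comienzoy
--         x += direcciónx
--         y += direccióny
--         if estaEnTablero(x, y) and tablero[x][y] == otraBaldosa:
--
--             x += direcciónx
--             y += direccióny
--             if not estaEnTablero(x, y):
--                 continue
--             while tablero[x][y] == otraBaldosa:
--                 x += direcciónx
--                 y += direccióny
--                 if not estaEnTablero(x, y):
--                     break
--             if not estaEnTablero(x, y):
--                 continue
--             if tablero[x][y] == baldosa:
--
--                 while True:
--                     x -= direcciónx
--                     y -= direccióny
--                     if x == comienzox and y == comienzoy:
--                         break
--                     baldosasAConvertir.append([x, y])
--
--     tablero[comienzox][comienzoy] = ' '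
--     if len(baldosasAConvertir) == 0:
--         return False
--     return baldosasAConvertir
--
-- def hacerJugada(tablero, baldosa, comienzox, comienzoy):
--
--     baldosasAConvertir = esJugadaValida(tablero, baldosa, comienzox, comienzoy)
--
--     if baldosasAConvertir == False:
--         return False
--
--     tablero[comienzox][comienzoy] = baldosa
--     for x, y in baldosasAConvertir:
--         tablero[x][y] = baldosa
--     return True
-- ===== SOURCE B (Python) =====
-- # B: single forward pass per direction collecting the capturable segment into a temp list;
-- # no helper returning list-or-False and no temporary write/reset of the start cell.
-- # The initial guard is A's, including its pre-bounds-check read of the start cell.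
-- # Return-value equivalence is what is proved; B performs the same net board mutation
-- # (same cells set to baldosa) as A when the move is valid.
-- size = 8
--
-- def estaEnTablero(x, y):
--     return 0 <= x < size and 0 <= y < size
--
-- def hacerJugada(tablero, baldosa, comienzox, comienzoy):
--     if tablero[comienzox][comienzoy] != ' ' or not estaEnTablero(comienzox, comienzoy):
--         return False
--     otra = '0' if baldosa == '1' else '1'
--     aConvertir = []
--     for dx, dy in ((0, 1), (1, 1), (1, 0), (1, -1), (0, -1), (-1, -1), (-1, 0), (-1, 1)):
--         x, y = comienzox + dx, comienzoy + dy
--         tramo = []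
--         while estaEnTablero(x, y) and tablero[x][y] == otra:
--             tramo.append((x, y))
--             x += dx
--             y += dy
--         if tramo and estaEnTablero(x, y) and tablero[x][y] == baldosa:
--             aConvertir.extend(tramo)
--     if not aConvertir:
--         return False
--     tablero[comienzox][comienzoy] = baldosa
--     for x, y in aConvertir:
--         tablero[x][y] = baldosa
--     return True
-- ===== Notes on version B (the rewrite author's own statement) =====
-- stated objective: simpler
-- what changed: B replaces A's helper returning a list-or-False, its temporary write/reset of the start cell and its forward-scan-then-backward-collect per direction by a single forward pass per direction that collects the capturable segment into a temporary list and keeps it only when it ends on an own tile.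
-- outside the precondition, e.g. on hacerJugada([[' ', 'a'], ['b', 'c']], '1', 0, 0): A returns False, B returns False
import Mathlib
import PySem

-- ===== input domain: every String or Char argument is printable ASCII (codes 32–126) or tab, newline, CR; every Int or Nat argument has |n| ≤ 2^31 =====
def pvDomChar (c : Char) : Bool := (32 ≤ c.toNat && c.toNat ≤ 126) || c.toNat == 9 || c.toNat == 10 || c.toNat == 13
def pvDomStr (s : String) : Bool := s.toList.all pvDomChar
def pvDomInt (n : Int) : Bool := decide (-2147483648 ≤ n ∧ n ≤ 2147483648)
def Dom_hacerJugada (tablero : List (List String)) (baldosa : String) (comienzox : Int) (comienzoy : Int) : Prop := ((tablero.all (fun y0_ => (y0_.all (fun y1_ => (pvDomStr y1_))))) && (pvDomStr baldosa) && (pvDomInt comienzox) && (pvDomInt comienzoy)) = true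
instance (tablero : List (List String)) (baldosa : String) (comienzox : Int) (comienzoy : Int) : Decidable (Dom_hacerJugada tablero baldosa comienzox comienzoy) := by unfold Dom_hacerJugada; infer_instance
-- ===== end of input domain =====

-- B replaces A's forward-scan-then-backward-collect (and its temporary write/reset of the
-- start cell, via a helper returning a list or False) by one forward pass per direction that
-- collects the capturable segment directly; equivalence is proved on the RETURN VALUE — both
-- Pythons also mutate the board, and B performs the same net mutation as A.

-- ===== PORT A =====
-- size = 8; estaEnTablero (shared by both Python modules, identical definition)
def estaEnTablero (x y : Int) : Bool := decide (0 ≤ x ∧ x < 8 ∧ 0 ≤ y ∧ y < 8)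

-- tablero[x][y] read; none = IndexError (excluded by Pre_)
def celda? (tablero : List (List String)) (x y : Int) : Option String :=
  (PySem.List.pyGet? tablero x).bind (fun fila => PySem.List.pyGet? fila y)

-- tablero[x][y] = v  (A executes it only with a valid in-board index)
def ponCelda (tablero : List (List String)) (x y : Int) (v : String) : List (List String) :=
  PySem.List.pySetD tablero x (PySem.List.pySetD (PySem.List.pyGetD tablero x []) y v)

-- A's 'while tablero[x][y] == otraBaldosa: step; break if off-board' loop (fuel 9 exceeds the
-- ≤ 8 steps an in-board walk can make; the loop is entered only on an in-board cell)
def buclePos (t : List (List String)) (otra : String) (dx dy : Int) : Nat → Int → Int → Int × Int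
  | 0, x, y => (x, y)
  | fuel+1, x, y =>
    if celda? t x y = some otra then
      if estaEnTablero (x + dx) (y + dy) = true then buclePos t otra dx dy fuel (x + dx) (y + dy)
      else (x + dx, y + dy)
    else (x, y)

-- A's backward 'while True' collection loop
def bucleAtras (sx sy dx dy : Int) : Nat → Int → Int → List (Int × Int)
  | 0, _, _ => []
  | fuel+1, x, y =>
    if x - dx = sx ∧ y - dy = sy then []
    else (x - dx, y - dy) :: bucleAtras sx sy dx dy fuel (x - dx) (y - dy)

-- one iteration of A's for-loop over directions
def exploraA (t : List (List String)) (baldosa otra : String) (sx sy dx dy : Int) : List (Int × Int) :=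
  if estaEnTablero (sx + dx) (sy + dy) = true ∧ celda? t (sx + dx) (sy + dy) = some otra then
    if ¬ estaEnTablero (sx + dx + dx) (sy + dy + dy) = true then []
    else
      let e := buclePos t otra dx dy 9 (sx + dx + dx) (sy + dy + dy)
      if ¬ estaEnTablero e.1 e.2 = true then []
      else if celda? t e.1 e.2 = some baldosa then bucleAtras sx sy dx dy 9 e.1 e.2
      else []
  else []

def direcciones : List (Int × Int) := [(0,1),(1,1),(1,0),(1,-1),(0,-1),(-1,-1),(-1,0),(-1,1)]

def esJugadaValida (t : List (List String)) (baldosa : String) (cx cy : Int) : Option (List (Int × Int)) :=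
  if ¬ celda? t cx cy = some " " ∨ ¬ estaEnTablero cx cy = true then none
  else
    let t' := ponCelda t cx cy baldosa
    let otra := if baldosa = "1" then "0" else "1"
    let flips := direcciones.foldl (fun acc d => acc ++ exploraA t' baldosa otra cx cy d.1 d.2) []
    -- tablero[cx][cy] = ' ' again: no effect on the returned value
    if flips = [] then none else some flips

def hacerJugada (tablero : List (List String)) (baldosa : String) (comienzox : Int) (comienzoy : Int) : Bool :=
  match esJugadaValida tablero baldosa comienzox comienzoy with
  | none => false
  | some _ => true

-- ===== PORT B =====
-- B's single forward collecting pass for one direction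
def avanzaB (t : List (List String)) (otra : String) (dx dy : Int) :
    Nat → Int → Int → List (Int × Int) → List (Int × Int) × Int × Int
  | 0, x, y, tramo => (tramo, x, y)
  | fuel+1, x, y, tramo =>
    if estaEnTablero x y = true ∧ celda? t x y = some otra then
      avanzaB t otra dx dy fuel (x + dx) (y + dy) (tramo ++ [(x, y)])
    else (tramo, x, y)

def exploraB (t : List (List String)) (baldosa otra : String) (sx sy dx dy : Int) : List (Int × Int) :=
  let r := avanzaB t otra dx dy 10 (sx + dx) (sy + dy) []
  if ¬ r.1 = [] ∧ estaEnTablero r.2.1 r.2.2 = true ∧ celda? t r.2.1 r.2.2 = some baldosa then r.1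
  else []

def hacerJugada_alt (tablero : List (List String)) (baldosa : String) (comienzox : Int) (comienzoy : Int) : Bool :=
  if ¬ celda? tablero comienzox comienzoy = some " " ∨ ¬ estaEnTablero comienzox comienzoy = true then false
  else
    let otra := if baldosa = "1" then "0" else "1"
    let aConvertir := direcciones.foldl (fun acc d => acc ++ exploraB tablero baldosa otra comienzox comienzoy d.1 d.2) []
    if aConvertir = [] then false else true

-- ===== PRECONDITION & SPEC =====
-- Pre_ excludes (a) inputs where tablero[comienzox][comienzoy] itself raises IndexError, and
-- (b) — a stated narrowing — inputs whose start cell is ' ' and inside the 8×8 board while the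
-- board is smaller than 8×8: there A's fixed size-8 directional scan may raise IndexError
-- mid-walk, though on some such boards A still returns False (excluded examples are cited).
def Pre_hacerJugada (tablero : List (List String)) (baldosa : String) (comienzox : Int) (comienzoy : Int) : Prop :=
  -(tablero.length : Int) ≤ comienzox ∧ comienzox < (tablero.length : Int) ∧
  ∀ fila ∈ (PySem.List.pyGet? tablero comienzox).toList,
    -(fila.length : Int) ≤ comienzoy ∧ comienzoy < (fila.length : Int) ∧
    (PySem.List.pyGet? fila comienzoy = some " " → 0 ≤ comienzox → comienzox < 8 →
      0 ≤ comienzoy → comienzoy < 8 →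
      8 ≤ tablero.length ∧ ∀ f ∈ tablero.take 8, 8 ≤ f.length)
instance (tablero : List (List String)) (baldosa : String) (comienzox : Int) (comienzoy : Int) : Decidable (Pre_hacerJugada tablero baldosa comienzox comienzoy) := by unfold Pre_hacerJugada; infer_instance

def pvWitness_hacerJugada : List (List String) × String × Int × Int :=
  ([[" "," "," "," "," "," "," "," "],
    [" "," "," "," "," "," "," "," "],
    [" "," "," "," "," "," "," "," "],
    [" "," "," ","0","1"," "," "," "],
    [" "," "," "," "," "," "," "," "],
    [" "," "," "," "," "," "," "," "],
    [" "," "," "," "," "," "," "," "],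
    [" "," "," "," "," "," "," "," "]], "1", 3, 2)

def Spec_hacerJugada (tablero : List (List String)) (baldosa : String) (comienzox : Int) (comienzoy : Int) (out : Bool) : Prop := out = hacerJugada_alt tablero baldosa comienzox comienzoy
instance (tablero : List (List String)) (baldosa : String) (comienzox : Int) (comienzoy : Int) (out : Bool) : Decidable (Spec_hacerJugada tablero baldosa comienzox comienzoy out) := by unfold Spec_hacerJugada; infer_instance

-- ===== CLAIM (what is proved, stated in full; the proofs are below) =====
def Claim_equal_hacerJugada : Prop := ∀ (tablero : List (List String)) (baldosa : String) (comienzox : Int) (comienzoy : Int), Dom_hacerJugada tablero baldosa comienzox comienzoy → Pre_hacerJugada tablero baldosa comienzox comienzoy → Spec_hacerJugada tablero baldosa comienzox comienzoy (hacerJugada tablero baldosa comienzox comienzoy)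

-- ===== LEMMAS AND PROOFS =====

-- reading any cell other than the overwritten one is unchanged
theorem celda?_ponCelda (t : List (List String)) (sx sy : Int) (v : String) (x y : Int)
    (hsx : 0 ≤ sx) (hsy : 0 ≤ sy) (hx : 0 ≤ x) (hy : 0 ≤ y) (hne : ¬ (x = sx ∧ y = sy)) :
    celda? (ponCelda t sx sy v) x y = celda? t x y := by
  obtain ⟨a, rfl⟩ : ∃ a : Nat, x = (a : Int) := ⟨x.toNat, (Int.toNat_of_nonneg hx).symm⟩
  obtain ⟨bb, rfl⟩ : ∃ b : Nat, y = (b : Int) := ⟨y.toNat, (Int.toNat_of_nonneg hy).symm⟩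
  obtain ⟨p, rfl⟩ : ∃ p : Nat, sx = (p : Int) := ⟨sx.toNat, (Int.toNat_of_nonneg hsx).symm⟩
  obtain ⟨q, rfl⟩ : ∃ q : Nat, sy = (q : Int) := ⟨sy.toNat, (Int.toNat_of_nonneg hsy).symm⟩
  unfold celda? ponCelda
  rw [PySem.List.pySetD_of_nonneg _ _ (by positivity), PySem.List.pySetD_of_nonneg _ _ (by positivity)]
  simp only [Int.toNat_natCast, PySem.List.pyGet?_natCast, List.getElem?_set]
  by_cases hpa : p = a
  · subst hpa
    have hqb : ¬ q = bb := by rintro rfl; exact hne ⟨rfl, rfl⟩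
    by_cases hlt : p < t.length
    · simp only [if_pos hlt]
      have hrow : PySem.List.pyGetD t (p : Int) [] = t[p] := by
        rw [PySem.List.pyGetD_eq_getElem t [] (by positivity) (by exact_mod_cast hlt)]
        simp
      rw [hrow, List.getElem?_eq_getElem hlt]
      simp [hqb]
    · simp [hlt]
  · simp [hpa]

-- the walk of A's forward while loop stays on the ray start + k·(dx,dy), k ≥ 2
theorem buclePos_ray (t : List (List String)) (otra : String) (sx sy dx dy : Int) :
    ∀ (fuel : Nat) (x y k : Int), 2 ≤ k → x = sx + k * dx → y = sy + k * dy →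
      ∃ k', 2 ≤ k' ∧ buclePos t otra dx dy fuel x y = (sx + k' * dx, sy + k' * dy) := by
  intro fuel
  induction fuel with
  | zero => intro x y k hk hx hy; exact ⟨k, hk, by simp [buclePos, hx, hy]⟩
  | succ n ih =>
    intro x y k hk hx hy
    unfold buclePos
    split
    · split
      · exact ih (x + dx) (y + dy) (k + 1) (by omega) (by rw [hx]; ring) (by rw [hy]; ring)
      · exact ⟨k + 1, by omega, by rw [hx, hy]; congr 1 <;> ring⟩
    · exact ⟨k, hk, by rw [hx, hy]⟩

-- the forward while loop never reads the start cell, so the temporary write is invisible to it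
theorem buclePos_ponCelda (t : List (List String)) (otra : String) (v : String) (sx sy dx dy : Int)
    (hsx : 0 ≤ sx) (hsy : 0 ≤ sy) (hd : ¬ (dx = 0 ∧ dy = 0)) :
    ∀ (fuel : Nat) (x y k : Int), 1 ≤ k → x = sx + k * dx → y = sy + k * dy → 0 ≤ x → 0 ≤ y →
      buclePos (ponCelda t sx sy v) otra dx dy fuel x y = buclePos t otra dx dy fuel x y := by
  intro fuel
  induction fuel with
  | zero => intro x y k _ _ _ _ _; simp [buclePos]
  | succ n ih =>
    intro x y k hk hx hy hx0 hy0
    have hne : ¬ (x = sx ∧ y = sy) := by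
      rintro ⟨h1, h2⟩
      apply hd
      constructor
      · rcases Int.mul_eq_zero.mp (show k * dx = 0 by omega) with h | h
        · omega
        · exact h
      · rcases Int.mul_eq_zero.mp (show k * dy = 0 by omega) with h | h
        · omega
        · exact h
    unfold buclePos
    rw [celda?_ponCelda t sx sy v x y hsx hsy hx0 hy0 hne]
    split
    · split
      · rename_i hE
        have hE' : 0 ≤ x + dx ∧ 0 ≤ y + dy := by
          simp only [estaEnTablero, decide_eq_true_eq] at hE
          exact ⟨hE.1, hE.2.2.1⟩
        exact ih (x + dx) (y + dy) (k + 1) (by omega) (by rw [hx]; ring) (by rw [hy]; ring) hE'.1 hE'.2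
      · rfl
    · rfl

-- A's whole directional scan ignores the temporarily written start cell
theorem exploraA_ponCelda (t : List (List String)) (b otra v : String) (sx sy dx dy : Int)
    (hsx : 0 ≤ sx) (hsy : 0 ≤ sy) (hd : ¬ (dx = 0 ∧ dy = 0)) :
    exploraA (ponCelda t sx sy v) b otra sx sy dx dy = exploraA t b otra sx sy dx dy := by
  have hne1 : ¬ (sx + dx = sx ∧ sy + dy = sy) := by rintro ⟨h1, h2⟩; exact hd ⟨by omega, by omega⟩
  unfold exploraA
  by_cases hE1 : estaEnTablero (sx + dx) (sy + dy) = true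
  · have h01 : 0 ≤ sx + dx ∧ 0 ≤ sy + dy := by
      simp only [estaEnTablero, decide_eq_true_eq] at hE1; exact ⟨hE1.1, hE1.2.2.1⟩
    rw [celda?_ponCelda t sx sy v _ _ hsx hsy h01.1 h01.2 hne1]
    by_cases hc : celda? t (sx + dx) (sy + dy) = some otra
    · simp only [hE1, hc, and_self, if_pos]
      by_cases hE2 : estaEnTablero (sx + dx + dx) (sy + dy + dy) = true
      · have h02 : 0 ≤ sx + dx + dx ∧ 0 ≤ sy + dy + dy := by
          simp only [estaEnTablero, decide_eq_true_eq] at hE2; exact ⟨hE2.1, hE2.2.2.1⟩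
        rw [buclePos_ponCelda t otra v sx sy dx dy hsx hsy hd 9 _ _ 2 (by omega) (by ring) (by ring) h02.1 h02.2]
        simp only [hE2, not_true_eq_false, if_false]
        obtain ⟨k', hk', he⟩ := buclePos_ray t otra sx sy dx dy 9 (sx + dx + dx) (sy + dy + dy) 2 (by omega) (by ring) (by ring)
        set e := buclePos t otra dx dy 9 (sx + dx + dx) (sy + dy + dy) with hedef
        by_cases hE3 : estaEnTablero e.1 e.2 = true
        · have h03 : 0 ≤ e.1 ∧ 0 ≤ e.2 := by
            simp only [estaEnTablero, decide_eq_true_eq] at hE3; exact ⟨hE3.1, hE3.2.2.1⟩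
          have hne3 : ¬ (e.1 = sx ∧ e.2 = sy) := by
            rintro ⟨h1, h2⟩
            rw [he] at h1 h2
            simp at h1 h2
            apply hd
            constructor
            · rcases Int.mul_eq_zero.mp (show k' * dx = 0 by omega) with h | h
              · omega
              · exact h
            · rcases Int.mul_eq_zero.mp (show k' * dy = 0 by omega) with h | h
              · omega
              · exact h
          rw [celda?_ponCelda t sx sy v e.1 e.2 hsx hsy h03.1 h03.2 hne3]
        · simp [hE3]
      · simp [hE2]
    · simp [hc]
  · simp [hE1]

-- B's collecting walk only appends to its accumulator …
theorem avanzaB_acc (t : List (List String)) (otra : String) (dx dy : Int) :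
    ∀ (fuel : Nat) (x y : Int) (acc : List (Int × Int)),
      ∃ l, (avanzaB t otra dx dy fuel x y acc).1 = acc ++ l := by
  intro fuel
  induction fuel with
  | zero => intro x y acc; exact ⟨[], by simp [avanzaB]⟩
  | succ n ih =>
    intro x y acc
    unfold avanzaB
    split
    · obtain ⟨l, hl⟩ := ih (x + dx) (y + dy) (acc ++ [(x, y)])
      exact ⟨(x, y) :: l, by rw [hl]; simp⟩
    · exact ⟨[], by simp⟩

-- … and, entered on an in-board cell, stops exactly where A's forward while loop stops
theorem avanzaB_pos (t : List (List String)) (otra : String) (dx dy : Int) :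
    ∀ (fuel : Nat) (x y : Int) (acc : List (Int × Int)), estaEnTablero x y = true →
      (avanzaB t otra dx dy fuel x y acc).2 = buclePos t otra dx dy fuel x y := by
  intro fuel
  induction fuel with
  | zero => intro x y acc _; simp [avanzaB, buclePos]
  | succ n ih =>
    intro x y acc hE
    unfold avanzaB buclePos
    by_cases hc : celda? t x y = some otra
    · simp only [hE, hc, and_self, if_pos]
      by_cases hE2 : estaEnTablero (x + dx) (y + dy) = true
      · rw [if_pos hE2, ih (x + dx) (y + dy) _ hE2]
      · rw [if_neg hE2]
        cases n with
        | zero => simp [avanzaB]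
        | succ m => unfold avanzaB; rw [if_neg (by simp [hE2])]
    · simp [hc]

-- per direction, A captures something iff B captures something
theorem explora_nil_iff (t : List (List String)) (b otra : String) (sx sy dx dy : Int)
    (hd : ¬ (dx = 0 ∧ dy = 0)) :
    (exploraA t b otra sx sy dx dy = [] ↔ exploraB t b otra sx sy dx dy = []) := by
  unfold exploraA exploraB
  by_cases h1 : estaEnTablero (sx + dx) (sy + dy) = true ∧ celda? t (sx + dx) (sy + dy) = some otra
  · rw [if_pos h1]
    have hstep1 : avanzaB t otra dx dy 10 (sx + dx) (sy + dy) [] =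
        avanzaB t otra dx dy 9 (sx + dx + dx) (sy + dy + dy) [(sx + dx, sy + dy)] := by
      show avanzaB t otra dx dy (9+1) (sx + dx) (sy + dy) [] = _
      unfold avanzaB
      rw [if_pos h1]
      rfl
    rw [hstep1]
    by_cases h2 : estaEnTablero (sx + dx + dx) (sy + dy + dy) = true
    · rw [if_neg (by simp [h2])]
      obtain ⟨l, hl⟩ := avanzaB_acc t otra dx dy 9 (sx + dx + dx) (sy + dy + dy) [(sx + dx, sy + dy)]
      have hpos := avanzaB_pos t otra dx dy 9 (sx + dx + dx) (sy + dy + dy) [(sx + dx, sy + dy)] h2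
      set r := avanzaB t otra dx dy 9 (sx + dx + dx) (sy + dy + dy) [(sx + dx, sy + dy)] with hrdef
      set e := buclePos t otra dx dy 9 (sx + dx + dx) (sy + dy + dy) with hedef
      have hr1 : ¬ r.1 = [] := by rw [hl]; simp
      obtain ⟨k', hk', he⟩ := buclePos_ray t otra sx sy dx dy 9 (sx + dx + dx) (sy + dy + dy) 2 (by omega) (by ring) (by ring)
      have heq : e = (sx + k' * dx, sy + k' * dy) := hedef.trans he
      by_cases h3 : estaEnTablero e.1 e.2 = true
      · rw [if_neg (by simp [h3])]
        by_cases h4 : celda? t e.1 e.2 = some b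
        · rw [if_pos h4, if_pos ⟨hr1, by rw [hpos]; exact h3, by rw [hpos]; exact h4⟩]
          constructor
          · intro hAB
            exfalso
            rw [show (9:Nat) = 8+1 from rfl] at hAB
            unfold bucleAtras at hAB
            rw [if_neg ?_] at hAB
            · exact List.cons_ne_nil _ _ hAB
            · rintro ⟨hh1, hh2⟩
              rw [heq] at hh1 hh2
              simp only [] at hh1 hh2
              apply hd
              constructor
              · rcases Int.mul_eq_zero.mp (show (k' - 1) * dx = 0 by
                  have hx' : sx + k' * dx - dx = sx := hh1
                  ring_nf
                  ring_nf at hx'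
                  omega) with h | h
                · omega
                · exact h
              · rcases Int.mul_eq_zero.mp (show (k' - 1) * dy = 0 by
                  have hy' : sy + k' * dy - dy = sy := hh2
                  ring_nf
                  ring_nf at hy'
                  omega) with h | h
                · omega
                · exact h
          · intro hB; exact absurd hB hr1
        · rw [if_neg h4, if_neg (by rintro ⟨_, _, hcc⟩; rw [hpos] at hcc; exact h4 hcc)]
      · rw [if_pos h3, if_neg (by rintro ⟨_, hcc, _⟩; rw [hpos] at hcc; exact h3 hcc)]
    · rw [if_pos h2]
      have hstop : avanzaB t otra dx dy 9 (sx + dx + dx) (sy + dy + dy) [(sx + dx, sy + dy)] =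
          ([(sx + dx, sy + dy)], (sx + dx + dx, sy + dy + dy)) := by
        show avanzaB t otra dx dy (8+1) _ _ _ = _
        unfold avanzaB
        rw [if_neg (by rintro ⟨hcc, _⟩; exact h2 hcc)]
      rw [hstop, if_neg (by rintro ⟨_, hcc, _⟩; exact h2 hcc)]
  · rw [if_neg h1]
    have hstop : avanzaB t otra dx dy 10 (sx + dx) (sy + dy) [] = ([], (sx + dx, sy + dy)) := by
      show avanzaB t otra dx dy (9+1) _ _ _ = _
      unfold avanzaB
      rw [if_neg h1]
    rw [hstop]
    simp

-- the two programs return the same Boolean on every input (the precondition is only needed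
-- for faithfulness of the ports to the Pythons, which raise outside it)
theorem hacerJugada_eq (t : List (List String)) (b : String) (cx cy : Int) :
    hacerJugada t b cx cy = hacerJugada_alt t b cx cy := by
  unfold hacerJugada hacerJugada_alt esJugadaValida
  by_cases hg : ¬ celda? t cx cy = some " " ∨ ¬ estaEnTablero cx cy = true
  · simp only [if_pos hg]
  · rw [if_neg hg, if_neg hg]
    push Not at hg
    obtain ⟨hc, hE⟩ := hg
    · have h0 : 0 ≤ cx ∧ cx < 8 ∧ 0 ≤ cy ∧ cy < 8 := by
        simpa [estaEnTablero] using hE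
      have key : ∀ d ∈ direcciones,
          (exploraA (ponCelda t cx cy b) b (if b = "1" then "0" else "1") cx cy d.1 d.2 = [] ↔
           exploraB t b (if b = "1" then "0" else "1") cx cy d.1 d.2 = []) := by
        intro d hdm
        have hd : ¬ (d.1 = 0 ∧ d.2 = 0) := by
          fin_cases hdm <;> simp
        rw [exploraA_ponCelda t b _ b cx cy d.1 d.2 h0.1 h0.2.2.1 hd]
        exact explora_nil_iff t b _ cx cy d.1 d.2 hd
      have hiff :
          (direcciones.foldl (fun acc d => acc ++ exploraA (ponCelda t cx cy b) b (if b = "1" then "0" else "1") cx cy d.1 d.2) [] = []) ↔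
          (direcciones.foldl (fun acc d => acc ++ exploraB t b (if b = "1" then "0" else "1") cx cy d.1 d.2) [] = []) := by
        rw [PySem.List.foldl_append_eq_flatMap, PySem.List.foldl_append_eq_flatMap]
        simp only [List.nil_append, List.flatMap_eq_nil_iff]
        exact ⟨fun h d hdm => (key d hdm).mp (h d hdm), fun h d hdm => (key d hdm).mpr (h d hdm)⟩
      by_cases hfa : direcciones.foldl (fun acc d => acc ++ exploraA (ponCelda t cx cy b) b (if b = "1" then "0" else "1") cx cy d.1 d.2) [] = []
      · simp [hfa, hiff.mp hfa]
      · have hfb : ¬ (direcciones.foldl (fun acc d => acc ++ exploraB t b (if b = "1" then "0" else "1") cx cy d.1 d.2) [] = []) := fun h => hfa (hiff.mpr h)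
        simp only [if_neg hfa]
        simp
        rw [PySem.List.foldl_append_eq_flatMap] at hfb
        simpa using hfb

-- ===== VERDICT (by name: the statement is the Claim_ definition above) =====
theorem hacerJugada_spec : Claim_equal_hacerJugada := by
  intro tablero baldosa comienzox comienzoy _ _
  unfold Spec_hacerJugada
  exact hacerJugada_eq tablero baldosa comienzox comienzoy
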